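-- pv_equiv track=rewrite | github.com/AP-MI-2021/lab-3-Rebee27 | main.py | get_longest_all_primes
-- ===== SOURCE A (Python) =====
-- def is_prime(n: int) -> bool:
--     if int(n) < 2:
--         return False
--
--     for i in range(2, int(n) // 2 + 1):
--         if int(n) % i == 0:
--             return False
--
--     return True
--
-- def numere_prime(lst: list[int]) -> bool:
--     for x in lst:
--         if not is_prime(x):
--             return False
--
--     return True
--
-- def get_longest_all_primes(lst: list[int]) -> list[int]:
--     subsecv_finala = []
--     lungime_max = 0
--
--     for i in range(len(lst)):
--         for j in range(i, len(lst)):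
--             subsecv_curenta = lst[i:j + 1]
--             if len(subsecv_curenta) > lungime_max and numere_prime(subsecv_curenta):
--                 lungime_max = len(subsecv_curenta)
--                 subsecv_finala = subsecv_curenta
--     return subsecv_finala
-- ===== SOURCE B (Python) =====
-- def _is_prime(n: int) -> bool:
--     if n < 2:
--         return False
--     d = 2
--     while d * d <= n:
--         if n % d == 0:
--             return False
--         d += 1
--     return True
--
--
-- def get_longest_all_primes(lst: list[int]) -> list[int]:
--     best = []
--     cur = []
--     for x in lst:
--         if _is_prime(x):
--             cur.append(x)
--             if len(cur) > len(best):
--                 best = cur[:]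
--         else:
--             cur = []
--     return best
-- ===== Notes on version B (the rewrite author's own statement) =====
-- stated objective: faster
-- what changed: Replaced the enumerate-all-O(n^2)-subsequences loop with a single left-to-right scan that tracks the current run of primes and keeps the first longest one, and replaced the n/2 trial-division bound with the sqrt bound (d*d <= n).
import Mathlib
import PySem

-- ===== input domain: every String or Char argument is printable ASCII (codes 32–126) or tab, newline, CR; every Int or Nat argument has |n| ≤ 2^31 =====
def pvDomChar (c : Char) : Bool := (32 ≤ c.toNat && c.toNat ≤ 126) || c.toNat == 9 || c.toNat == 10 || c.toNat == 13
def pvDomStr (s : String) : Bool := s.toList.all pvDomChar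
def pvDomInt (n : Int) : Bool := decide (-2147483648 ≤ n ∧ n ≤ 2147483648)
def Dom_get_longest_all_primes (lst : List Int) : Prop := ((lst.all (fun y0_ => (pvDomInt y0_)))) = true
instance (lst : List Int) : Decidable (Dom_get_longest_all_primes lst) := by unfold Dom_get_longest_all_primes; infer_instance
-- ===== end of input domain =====

-- B replaces A's scan of all O(n^2) windows (each re-checked by trial division up to n//2)
-- with one left-to-right pass tracking the current prime run (sqrt-bounded trial division),
-- keeping the first longest run — same return value, asymptotically faster.

-- ===== PORT A =====
-- A's is_prime for-loop `for i in range(2, n//2+1)` ported step for step as a tail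
-- recursion over i (exact: same divisor tests, same order, early return on n % i == 0)
def isPrimeLoopA (n i : Int) : Bool :=
  if _h : i < PySem.Int.floordiv n 2 + 1 then
    if PySem.Int.mod n i == 0 then false
    else isPrimeLoopA n (i + 1)
  else true
termination_by (PySem.Int.floordiv n 2 + 1 - i).toNat
decreasing_by omega

def is_prime (n : Int) : Bool :=
  if n < 2 then false else isPrimeLoopA n 2

-- `for x in lst: if not is_prime(x): return False / return True` is List.all
def numere_prime (lst : List Int) : Bool := lst.all is_prime

def innerStepA (lst : List Int) (i : Int) (st : List Int × Int) (j : Int) : List Int × Int :=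
  let sub := PySem.List.slice lst (some i) (some (j + 1))
  if decide ((sub.length : Int) > st.2) && numere_prime sub then (sub, (sub.length : Int)) else st

def get_longest_all_primes (lst : List Int) : List Int :=
  ((PySem.List.pyRange 0 (lst.length : Int) 1).foldl
    (fun st i => (PySem.List.pyRange i (lst.length : Int) 1).foldl (innerStepA lst i) st)
    (([] : List Int), (0 : Int))).1

-- ===== PORT B =====
-- B's `while d * d <= n` trial-division loop, ported step for step (exact: same
-- tests in the same order, early return on n % d == 0)
def trialLoopB (n d : Int) : Bool :=
  if _h : d * d ≤ n then
    if PySem.Int.mod n d == 0 then false else trialLoopB n (d + 1)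
  else true
termination_by (n + 1 - d).toNat
decreasing_by
  have hd : d ≤ n := by nlinarith [mul_self_nonneg d]
  omega

def is_prime_b (n : Int) : Bool :=
  if n < 2 then false else trialLoopB n 2

def bStep (st : List Int × List Int) (x : Int) : List Int × List Int :=
  if is_prime_b x then
    let c := st.2 ++ [x]
    (if st.1.length < c.length then c else st.1, c)
  else (st.1, [])

def get_longest_all_primes_alt (lst : List Int) : List Int :=
  (lst.foldl bStep (([] : List Int), ([] : List Int))).1

-- ===== PRECONDITION & SPEC =====
def Spec_get_longest_all_primes (lst : List Int) (out : List Int) : Prop := out = get_longest_all_primes_alt lst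
instance (lst : List Int) (out : List Int) : Decidable (Spec_get_longest_all_primes lst out) := by unfold Spec_get_longest_all_primes; infer_instance

-- ===== CLAIM (what is proved, stated in full; the proofs are below) =====
def Claim_equal_get_longest_all_primes : Prop := ∀ (lst : List Int), Dom_get_longest_all_primes lst → Spec_get_longest_all_primes lst (get_longest_all_primes lst)

-- ===== LEMMAS AND PROOFS =====

theorem isPrimeLoopA_iff (n i : Int) : isPrimeLoopA n i = true ↔
    ∀ k : Int, i ≤ k → k < PySem.Int.floordiv n 2 + 1 → PySem.Int.mod n k ≠ 0 := by
  fun_induction isPrimeLoopA n i with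
  | case1 i h hm =>
    simp only [beq_iff_eq] at hm
    simp only [Bool.false_eq_true, false_iff]
    exact fun H => H i le_rfl h hm
  | case2 i h hm ih =>
    simp only [beq_iff_eq] at hm
    rw [ih]
    constructor
    · intro H k hk1 hk2
      rcases eq_or_lt_of_le hk1 with rfl | hlt
      · exact hm
      · exact H k (by omega) hk2
    · intro H k hk1 hk2
      exact H k (by omega) hk2
  | case3 i h =>
    simp only [true_iff]
    intro k hk1 hk2
    omega

theorem trialLoopB_iff (n d : Int) (hd : 0 ≤ d) : trialLoopB n d = true ↔
    ∀ k : Int, d ≤ k → k * k ≤ n → PySem.Int.mod n k ≠ 0 := by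
  revert hd
  fun_induction trialLoopB n d with
  | case1 d h hm =>
    intro hd
    simp only [beq_iff_eq] at hm
    simp only [Bool.false_eq_true, false_iff]
    exact fun H => H d le_rfl h hm
  | case2 d h hm ih =>
    intro hd
    simp only [beq_iff_eq] at hm
    rw [ih (by omega)]
    constructor
    · intro H k hk1 hk2
      rcases eq_or_lt_of_le hk1 with rfl | hlt
      · exact hm
      · exact H k (by omega) hk2
    · intro H k hk1 hk2
      exact H k (by omega) hk2
  | case3 d h =>
    intro hd
    simp only [true_iff]
    intro k hk1 hk2
    nlinarith [mul_self_le_mul_self hd hk1]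

theorem prime_eq (n : Int) : is_prime n = is_prime_b n := by
  unfold is_prime is_prime_b
  by_cases hn : n < 2
  · simp [hn]
  · simp only [hn, if_false]
    rw [Bool.eq_iff_iff, isPrimeLoopA_iff, trialLoopB_iff n 2 (by omega)]
    push_cast at hn
    have h2 : (0:Int) < 2 := by omega
    have hfd : PySem.Int.floordiv n 2 = n / 2 := PySem.Int.floordiv_eq_ediv_of_pos h2
    constructor
    · intro H k hk1 hk2
      apply H k hk1
      rw [hfd]
      have : k ≤ n / 2 := by
        rw [Int.le_ediv_iff_mul_le h2]
        nlinarith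
      omega
    · intro H k hk1 hk2
      rw [hfd] at hk2
      have hk2' : k * 2 ≤ n := by
        rw [← Int.le_ediv_iff_mul_le h2]; omega
      rw [Ne, PySem.Int.mod_eq_zero_iff_dvd]
      rintro ⟨m, rfl⟩
      have hm2 : 2 ≤ m := by nlinarith
      rcases le_or_gt k m with hkm | hkm
      · exact H k hk1 (by nlinarith) (by rw [PySem.Int.mod_eq_zero_iff_dvd]; exact ⟨m, rfl⟩)
      · exact H m hm2 (by nlinarith) (by rw [PySem.Int.mod_eq_zero_iff_dvd]; exact ⟨k, mul_comm k m⟩)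

theorem numere_prime_eq (l : List Int) : numere_prime l = l.all is_prime_b := by
  unfold numere_prime
  induction l with
  | nil => rfl
  | cons x xs ih => simp [List.all_cons, prime_eq, ih]

def best2 (b t : List Int) : List Int := if b.length < t.length then t else b

def canon (b : List Int) : List Int → List Int
  | [] => b
  | x :: xs => canon (best2 b ((x :: xs).takeWhile is_prime_b)) xs

theorem all_take_iff (l : List Int) (k : Nat) (hk : k ≤ l.length) :
    (l.take k).all is_prime_b = true ↔ k ≤ (l.takeWhile is_prime_b).length := by
  induction l generalizing k with
  | nil => simp at hk; simp [hk]
  | cons x xs ih =>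
    cases k with
    | zero => simp
    | succ k =>
      cases hp : is_prime_b x
      · rw [List.take_succ_cons, List.takeWhile_cons_of_neg (by simp [hp])]
        simp [hp]
      · rw [List.take_succ_cons, List.takeWhile_cons_of_pos hp, List.all_cons, hp]
        simp only [Bool.true_and, List.length_cons]
        rw [ih k (by simpa using hk)]
        omega

theorem take_len_takeWhile (l : List Int) :
    l.take (l.takeWhile is_prime_b).length = l.takeWhile is_prime_b :=
  (List.prefix_iff_eq_take.mp (List.takeWhile_prefix _)).symm

theorem inner_eq (lst : List Int) (i : Int) (hi : 0 ≤ i) (c : Nat) :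
    ∀ (j0 : Int) (b : List Int), i ≤ j0 → (lst.length : Int) - j0 ≤ (c : Int) →
    (PySem.List.pyRange j0 (lst.length : Int) 1).foldl (innerStepA lst i) (b, (b.length : Int)) =
      (fun r => (r, (r.length : Int)))
        (if b.length < ((lst.drop i.toNat).takeWhile is_prime_b).length ∧
            j0 < i + (((lst.drop i.toNat).takeWhile is_prime_b).length : Int)
         then (lst.drop i.toNat).takeWhile is_prime_b else b) := by
  have hiN : (i.toNat : Int) = i := Int.toNat_of_nonneg hi
  have hlen : (lst.drop i.toNat).length = lst.length - i.toNat := List.length_drop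
  have htw : ((lst.drop i.toNat).takeWhile is_prime_b).length ≤ (lst.drop i.toNat).length :=
    (List.takeWhile_prefix _).length_le
  induction c with
  | zero =>
    intro j0 b hij hc
    rw [PySem.List.pyRange_one_eq_nil (by omega)]
    simp only [List.foldl_nil]
    rw [if_neg (by omega)]
  | succ c ih =>
    intro j0 b hij hc
    by_cases hj : (lst.length : Int) ≤ j0
    · rw [PySem.List.pyRange_one_eq_nil hj]
      simp only [List.foldl_nil]
      rw [if_neg (by omega)]
    · rw [Int.not_le] at hj
      rw [PySem.List.pyRange_one_cons (by omega), List.foldl_cons]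
      set t := (lst.drop i.toNat).takeWhile is_prime_b with ht
      set k : Nat := ((j0 + 1).toNat - i.toNat) with hkdef
      have hk1 : (k : Int) = j0 + 1 - i := by omega
      have hkle : k ≤ (lst.drop i.toNat).length := by omega
      have hsub : PySem.List.slice lst (some i) (some (j0 + 1)) = (lst.drop i.toNat).take k :=
        PySem.List.slice_toNat lst hi (by omega)
      have hsublen : ((lst.drop i.toNat).take k).length = k := by
        simp [List.length_take]; omega
      simp only [innerStepA, hsub, numere_prime_eq, hsublen]
      by_cases hcond : b.length < k ∧ k ≤ t.length
      · rw [if_pos ?pos]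
        case pos =>
          simp only [Bool.and_eq_true, decide_eq_true_iff]
          exact ⟨by exact_mod_cast Nat.cast_lt.mpr hcond.1, (all_take_iff _ k hkle).mpr hcond.2⟩
        have hih := ih (j0 + 1) ((lst.drop i.toNat).take k) (by omega) (by omega)
        rw [hsublen] at hih
        rw [hih]
        rcases Nat.lt_or_ge k t.length with hkt | hkt
        · rw [if_pos (show k < t.length ∧
                j0 + 1 < i + (t.length : Int) from ⟨by omega, by omega⟩),
              if_pos (show b.length < t.length ∧ j0 < i + (t.length : Int) from
                ⟨by omega, by omega⟩)]
        · have heq : List.take k (List.drop i.toNat lst) = t := by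
            rw [show k = t.length from by omega]
            exact take_len_takeWhile _
          rw [if_neg (show ¬(k < t.length ∧
                j0 + 1 < i + (t.length : Int)) from by omega),
              if_pos (show b.length < t.length ∧ j0 < i + (t.length : Int) from
                ⟨by omega, by omega⟩), heq]
      · rw [if_neg ?neg]
        case neg =>
          simp only [Bool.and_eq_true, decide_eq_true_iff]
          rintro ⟨h1, h2⟩
          exact hcond ⟨by exact_mod_cast h1, (all_take_iff _ k hkle).mp h2⟩
        rw [ih (j0 + 1) b (by omega) (by omega)]
        by_cases hC1 : b.length < t.length ∧ j0 + 1 < i + (t.length : Int)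
        · rw [if_pos hC1, if_pos ⟨hC1.1, by omega⟩]
        · have h3 : ¬(b.length < t.length ∧ j0 < i + (t.length : Int)) := by
            rintro ⟨h1, h2⟩
            have h4 : ¬(j0 + 1 < i + (t.length : Int)) := fun hq => hC1 ⟨h1, hq⟩
            exact hcond ⟨by omega, by omega⟩
          rw [if_neg hC1, if_neg h3]

theorem best2_len (b t : List Int) : t.length ≤ (best2 b t).length := by
  unfold best2; split_ifs <;> omega

theorem best2_small (b t : List Int) (h : t.length ≤ b.length) : best2 b t = b :=
  if_neg (by omega)

theorem best2_absorb (b c e : List Int) : best2 (best2 b c) (c ++ e) = best2 b (c ++ e) := by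
  by_cases h1 : b.length < c.length
  · by_cases he : e = []
    · subst he
      simp only [List.append_nil, best2, if_pos h1]
      rw [if_neg (by omega)]
    · have hel : 0 < e.length := List.length_pos_of_ne_nil he
      simp only [best2, List.length_append, if_pos h1]
      rw [if_pos (by omega), if_pos (by omega)]
  · unfold best2
    rw [if_neg h1]

theorem outer_eq (lst : List Int) (c : Nat) :
    ∀ (i0 : Int) (b : List Int), 0 ≤ i0 → (lst.length : Int) - i0 ≤ (c : Int) →
    (PySem.List.pyRange i0 (lst.length : Int) 1).foldl
      (fun st i => (PySem.List.pyRange i (lst.length : Int) 1).foldl (innerStepA lst i) st)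
      (b, (b.length : Int)) =
    (canon b (lst.drop i0.toNat), ((canon b (lst.drop i0.toNat)).length : Int)) := by
  induction c with
  | zero =>
    intro i0 b h0 hc
    rw [PySem.List.pyRange_one_eq_nil (by omega), List.foldl_nil,
        List.drop_eq_nil_of_le (by omega)]
    rfl
  | succ c ih =>
    intro i0 b h0 hc
    by_cases hl : (lst.length : Int) ≤ i0
    · rw [PySem.List.pyRange_one_eq_nil hl, List.foldl_nil, List.drop_eq_nil_of_le (by omega)]
      rfl
    · rw [Int.not_le] at hl
      rw [PySem.List.pyRange_one_cons (by omega), List.foldl_cons]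
      have hinner := inner_eq lst i0 h0 lst.length i0 b le_rfl (by omega)
      rw [hinner]
      set t := (lst.drop i0.toNat).takeWhile is_prime_b with ht
      have hbest : (if b.length < t.length ∧ i0 < i0 + (t.length : Int) then t else b) = best2 b t := by
        unfold best2
        by_cases h1 : b.length < t.length
        · rw [if_pos ⟨h1, by omega⟩, if_pos h1]
        · rw [if_neg (by omega), if_neg h1]
      simp only [hbest]
      rw [ih (i0 + 1) (best2 b t) (by omega) (by omega)]
      obtain ⟨a, hsplit⟩ : ∃ a, lst.drop i0.toNat = a :: lst.drop (i0.toNat + 1) :=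
        ⟨_, List.drop_eq_getElem_cons (by omega)⟩
      have htoNat : (i0 + 1).toNat = i0.toNat + 1 := by omega
      rw [htoNat]
      conv_rhs => rw [hsplit]
      have htt : (a :: lst.drop (i0.toNat + 1)).takeWhile is_prime_b = t := by
        rw [ht, hsplit]
      have hcanon : canon b (a :: lst.drop (i0.toNat + 1)) =
          canon (best2 b ((a :: lst.drop (i0.toNat + 1)).takeWhile is_prime_b))
            (lst.drop (i0.toNat + 1)) := rfl
      rw [hcanon, htt]

theorem canon_skip (xs : List Int) : ∀ b : List Int,
    canon (best2 b (xs.takeWhile is_prime_b)) (xs.dropWhile is_prime_b) = canon b xs := by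
  induction xs with
  | nil =>
    intro b
    simp only [List.takeWhile_nil, List.dropWhile_nil]
    rw [best2_small b [] (by simp)]
  | cons x xs ih =>
    intro b
    cases hp : is_prime_b x
    · rw [List.takeWhile_cons_of_neg (by simp [hp]), List.dropWhile_cons_of_neg (by simp [hp]),
          best2_small b [] (by simp)]
    · rw [List.takeWhile_cons_of_pos hp, List.dropWhile_cons_of_pos hp]
      have hrhs : canon b (x :: xs) = canon (best2 b (x :: xs.takeWhile is_prime_b)) xs := by
        have : canon b (x :: xs) = canon (best2 b ((x :: xs).takeWhile is_prime_b)) xs := rfl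
        rw [this, List.takeWhile_cons_of_pos hp]
      rw [hrhs, ← ih (best2 b (x :: xs.takeWhile is_prime_b))]
      congr 1
      have h1 : (xs.takeWhile is_prime_b).length ≤ (x :: xs.takeWhile is_prime_b).length :=
        Nat.le_succ _
      exact (best2_small _ _ (le_trans h1 (best2_len b (x :: xs.takeWhile is_prime_b)))).symm

theorem foldB_eq (xs : List Int) : ∀ (b cur : List Int), cur.length ≤ b.length →
    (xs.foldl bStep (b, cur)).1 =
      canon (best2 b (cur ++ xs.takeWhile is_prime_b)) (xs.dropWhile is_prime_b) := by
  induction xs with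
  | nil =>
    intro b cur h
    simp only [List.foldl_nil, List.takeWhile_nil, List.dropWhile_nil, List.append_nil]
    rw [best2_small b cur h]
    rfl
  | cons x xs ih =>
    intro b cur h
    rw [List.foldl_cons]
    cases hp : is_prime_b x
    · have hstep : bStep (b, cur) x = (b, []) := by simp [bStep, hp]
      rw [hstep, ih b [] (by simp), List.takeWhile_cons_of_neg (by simp [hp]),
          List.dropWhile_cons_of_neg (by simp [hp]), List.nil_append, canon_skip,
          List.append_nil, best2_small b cur h]
      conv_rhs => rw [show canon b (x :: xs) =
        canon (best2 b ((x :: xs).takeWhile is_prime_b)) xs from rfl]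
      rw [List.takeWhile_cons_of_neg (by simp [hp]), best2_small b [] (by simp)]
    · have hstep : bStep (b, cur) x = (best2 b (cur ++ [x]), cur ++ [x]) := by
        simp only [bStep, hp]
        rfl
      rw [hstep, ih (best2 b (cur ++ [x])) (cur ++ [x]) (best2_len b (cur ++ [x])),
          best2_absorb, List.takeWhile_cons_of_pos hp, List.dropWhile_cons_of_pos hp]
      congr 2
      simp

theorem alt_eq_canon (lst : List Int) : get_longest_all_primes_alt lst = canon [] lst := by
  unfold get_longest_all_primes_alt
  rw [foldB_eq lst [] [] le_rfl, List.nil_append, canon_skip]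

theorem A_eq_canon (lst : List Int) : get_longest_all_primes lst = canon [] lst := by
  unfold get_longest_all_primes
  have h := outer_eq lst lst.length 0 [] le_rfl (by omega)
  simp only [List.length_nil, Nat.cast_zero] at h
  rw [h]
  simp

-- ===== VERDICT (by name: the statement is the Claim_ definition above) =====
theorem get_longest_all_primes_spec : Claim_equal_get_longest_all_primes := by
  intro lst _
  unfold Spec_get_longest_all_primes
  rw [A_eq_canon, alt_eq_canon]
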